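-- pv_equiv track=rewrite | github.com/rafaaga/Judges | Python/UVA-11413.py | solve
-- ===== SOURCE A (Python) =====
-- def f(x, k, A):
--     ans, ac, i = 1, 0, 0
--     while i < len(A) and ans <= k:
--         if ac + A[i] <= x:
--          ac += A[i]
--         else:
--             ans += 1
--             ac = A[i]
--         i += 1
--     return ans
--
-- def solve(A, k):
--     l, r = max(A), sum(A)
--     while l < r:
--         mid = l + ((r-l)>>1)
--         if f(mid, k, A) <= k:
--             r = mid
--         else:
--             l = mid + 1
--     return l
-- ===== SOURCE B (Python) =====
-- def solve(A, k):
--     # Recursive bisection; feasibility = full (uncapped) greedy piece count.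
--     def pieces(x):
--         c, ac = 1, 0
--         for a in A:
--             if ac + a <= x:
--                 ac += a
--             else:
--                 c, ac = c + 1, a
--         return c
--
--     def search(lo, hi):
--         if lo >= hi:
--             return lo
--         mid = (lo + hi) // 2
--         return search(lo, mid) if pieces(mid) <= k else search(mid + 1, hi)
--
--     return search(max(A), sum(A))
-- ===== Notes on version B (the rewrite author's own statement) =====
-- stated objective: alternative
-- what changed: A's iterative bisection with an early-exit capped counting loop is replaced by a recursive bisection whose feasibility test is the full (uncapped) greedy piece count computed by a single fold over the list; the bisection trajectory itself is semantically forced because A's predicate is not monotone on lists containing negative numbers, so exact equality leaves only the decomposition free.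
-- outside the precondition, e.g. on solve([], 3): A raises ValueError, B raises ValueError
import Mathlib
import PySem

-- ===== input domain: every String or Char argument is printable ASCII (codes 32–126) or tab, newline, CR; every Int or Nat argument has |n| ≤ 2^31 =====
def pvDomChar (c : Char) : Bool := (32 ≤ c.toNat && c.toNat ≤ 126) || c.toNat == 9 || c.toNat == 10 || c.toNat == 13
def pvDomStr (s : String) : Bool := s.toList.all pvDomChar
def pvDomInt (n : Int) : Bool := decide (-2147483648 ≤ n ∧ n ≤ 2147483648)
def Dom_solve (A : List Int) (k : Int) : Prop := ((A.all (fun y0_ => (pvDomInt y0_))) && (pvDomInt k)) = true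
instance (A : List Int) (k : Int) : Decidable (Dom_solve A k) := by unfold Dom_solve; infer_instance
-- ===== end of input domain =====

-- ===== PORT A =====
-- B replaces A's iterative bisection + early-exit capped count by a recursive bisection + a fold
-- computing the full greedy piece count (alternative decomposition; same asymptotic cost).
-- while loop of f: recursion over the list with state (ans, ac); the 'ans <= k' part of the loop guard is the leading if
def fLoop (x k : Int) (ans ac : Int) : List Int → Int
  | [] => ans
  | a :: rest =>
    if ans ≤ k then
      if ac + a ≤ x then fLoop x k ans (ac + a) rest
      else fLoop x k (ans + 1) a rest
    else ans

-- while l < r of solve; mid = l + ((r-l)>>1) is inlined ('>>>' is Python's arithmetic shift, exact);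
-- fuel = (r-l).toNat only makes the loop total: it shrinks by at least 1 per iteration, so it never runs out while l < r
def solveLoop (A : List Int) (k : Int) : Nat → Int → Int → Int
  | 0, l, _ => l
  | fuel + 1, l, r =>
    if l < r then
      if fLoop (l + ((r - l) >>> (1 : Nat))) k 1 0 A ≤ k then
        solveLoop A k fuel l (l + ((r - l) >>> (1 : Nat)))
      else
        solveLoop A k fuel (l + ((r - l) >>> (1 : Nat)) + 1) r
    else l

def solve (A : List Int) (k : Int) : Int :=
  solveLoop A k (A.sum - (PySem.List.max? A (fun y => y)).getD 0).toNat
    ((PySem.List.max? A (fun y => y)).getD 0) A.sum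

-- ===== PORT B =====
-- pieces(x): one fold over A with state (c, ac), no cap
def pieces (A : List Int) (x : Int) : Int :=
  (A.foldl (fun s a => if s.2 + a ≤ x then (s.1, s.2 + a) else (s.1 + 1, a)) (1, 0)).1

-- search(lo, hi): recursive bisection, mid = (lo+hi)//2 inlined; same sufficient fuel makes it total
def search (A : List Int) (k : Int) : Nat → Int → Int → Int
  | 0, lo, _ => lo
  | fuel + 1, lo, hi =>
    if lo ≥ hi then lo
    else
      if pieces A (PySem.Int.floordiv (lo + hi) 2) ≤ k then
        search A k fuel lo (PySem.Int.floordiv (lo + hi) 2)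
      else
        search A k fuel (PySem.Int.floordiv (lo + hi) 2 + 1) hi

def solve_alt (A : List Int) (k : Int) : Int :=
  search A k (A.sum - (PySem.List.max? A (fun y => y)).getD 0).toNat
    ((PySem.List.max? A (fun y => y)).getD 0) A.sum

-- ===== PRECONDITION & SPEC =====
-- Pre_ excludes only the empty list, on which Python's max(A) raises ValueError (B raises too).
def Pre_solve (A : List Int) (k : Int) : Prop := A ≠ []
instance (A : List Int) (k : Int) : Decidable (Pre_solve A k) := by unfold Pre_solve; infer_instance
def pvWitness_solve : List Int × Int := ([1, 2, 3], 2)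

def Spec_solve (A : List Int) (k : Int) (out : Int) : Prop := out = solve_alt A k
instance (A : List Int) (k : Int) (out : Int) : Decidable (Spec_solve A k out) := by unfold Spec_solve; infer_instance

-- ===== CLAIM (what is proved, stated in full; the proofs are below) =====
def Claim_equal_solve : Prop := ∀ (A : List Int) (k : Int), Dom_solve A k → Pre_solve A k → Spec_solve A k (solve A k)

-- ===== LEMMAS AND PROOFS =====

-- B's fold step, named for the lemmas
def pstep (x : Int) : Int × Int → Int → Int × Int :=
  fun s a => if s.2 + a ≤ x then (s.1, s.2 + a) else (s.1 + 1, a)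

theorem pieces_eq_foldl (A : List Int) (x : Int) :
    pieces A x = (A.foldl (pstep x) (1, 0)).1 := rfl

-- the uncapped count never drops below its starting value
theorem foldl_fst_ge (x : Int) (L : List Int) :
    ∀ c ac : Int, c ≤ (L.foldl (pstep x) (c, ac)).1 := by
  induction L with
  | nil => intro c ac; simp
  | cons a rest ih =>
    intro c ac
    simp only [List.foldl_cons, pstep]
    by_cases h : ac + a ≤ x
    · simpa [h] using ih c (ac + a)
    · rw [if_neg h]
      exact le_trans (by omega) (ih (c + 1) a)

-- A's capped loop and B's uncapped fold agree on the comparison with k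
theorem cap_iff (x k : Int) (L : List Int) :
    ∀ ans ac : Int, (fLoop x k ans ac L ≤ k ↔ (L.foldl (pstep x) (ans, ac)).1 ≤ k) := by
  induction L with
  | nil => intro ans ac; simp [fLoop]
  | cons a rest ih =>
    intro ans ac
    simp only [fLoop, List.foldl_cons, pstep]
    by_cases hk : ans ≤ k
    · rw [if_pos hk]
      by_cases h : ac + a ≤ x
      · rw [if_pos h, if_pos h]; exact ih ans (ac + a)
      · rw [if_neg h, if_neg h]; exact ih (ans + 1) a
    · rw [if_neg hk]
      by_cases h : ac + a ≤ x
      · rw [if_pos h]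
        have hge := foldl_fst_ge x rest ans (ac + a)
        constructor <;> intro <;> omega
      · rw [if_neg h]
        have hge := foldl_fst_ge x rest (ans + 1) a
        constructor <;> intro <;> omega

-- B's midpoint (lo+hi)//2 equals A's l + ((r-l)>>1)
theorem mid_eq (l r : Int) :
    PySem.Int.floordiv (l + r) 2 = l + ((r - l) >>> (1 : Nat)) := by
  rw [PySem.Int.floordiv_eq_ediv_of_pos (by norm_num : (0:Int) < 2)]
  simp only [Int.shiftRight_eq_div_pow, pow_one]
  omega

-- with the same fuel the two bisections coincide step for step
theorem loop_eq (A : List Int) (k : Int) :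
    ∀ fuel : Nat, ∀ l r : Int, solveLoop A k fuel l r = search A k fuel l r := by
  intro fuel
  induction fuel with
  | zero => intro l r; rfl
  | succ m ih =>
    intro l r
    rw [solveLoop, search]
    by_cases hlr : l < r
    · rw [if_pos hlr, if_neg (by omega : ¬ l ≥ r), mid_eq l r, pieces_eq_foldl]
      by_cases hf : fLoop (l + ((r - l) >>> (1 : Nat))) k 1 0 A ≤ k
      · rw [if_pos hf, if_pos ((cap_iff _ k A 1 0).mp hf)]
        exact ih l (l + ((r - l) >>> (1 : Nat)))
      · rw [if_neg hf, if_neg (fun hh => hf ((cap_iff _ k A 1 0).mpr hh))]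
        exact ih (l + ((r - l) >>> (1 : Nat)) + 1) r
    · rw [if_neg hlr, if_pos (by omega : l ≥ r)]

-- ===== VERDICT (by name: the statement is the Claim_ definition above) =====
theorem solve_spec : Claim_equal_solve := by
  intro A k _ _
  unfold Spec_solve solve solve_alt
  exact loop_eq A k _ _ _
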